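-- pv_equiv track=rewrite | github.com/EricRobertBrewer/litbank-entities | litbank_entities/litbank.py | get_category_sentence_phrases
-- ===== SOURCE A (Python) =====
-- import operator
-- from typing import List, Tuple
--
-- ENTITY_CATEGORIES = ['PER', 'FAC', 'GPE', 'LOC', 'VEH', 'ORG']
--
-- Phrase = Tuple[int, int, int]
--
-- def get_category_sentence_phrases(sentence_labels: List[List[List[str]]], categories=None) \
--         -> List[List[List[Phrase]]]:
--     """
--     Transform labels (as found in the tsv file) into phrases.
--
--     :param sentence_labels: "Flattened" sentence labels.
--     :param categories: Iterable of category names.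
--
--     :return: Tuples as `(t_start, t_end, nest_depth)` per sentence per category as
--     ordered in `ENTITY_CATEGORIES`. `t_start` is inclusive and `t_end` is exclusive.
--     """
--     if categories is None:
--         categories = ENTITY_CATEGORIES
--     category_to_id = {category: i for i, category in enumerate(categories)}
--
--     category_sentence_phrases = [list() for _ in categories]
--     for labels in sentence_labels:
--         category_phrases = [list() for _ in categories]
--         for depth in range(len(labels[0])):
--             category_id, t_start = None, None
--             for t, label in enumerate(labels):
--                 nest_label = label[depth]
--                 if nest_label == 'O' or nest_label.startswith('B-'):
--                     if category_id is not None: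
--                         # noinspection PyTypeChecker
--                         category_phrases[category_id].append((t_start, t, depth))
--                         category_id, t_start = None, None
--                     if nest_label.startswith('B-') and nest_label[2:] in category_to_id.keys():
--                         category_id, t_start = category_to_id[nest_label[2:]], t
--                 elif nest_label.startswith('I-'):
--                     # assert category_to_id[nest_label[2:]] == category_id
--                     pass  # If above assertion fails, the recognizer emitted an extraneous `I`.
--                 else:
--                     raise ValueError('Unexpected label: {}'.format(nest_label))
--             if category_id is not None:
--                 # noinspection PyTypeChecker
--                 category_phrases[category_id].append((t_start, len(labels), depth))
--         for i, phrases in enumerate(category_phrases):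
--             phrases.sort(key=operator.itemgetter(0, 1))
--             category_sentence_phrases[i].append(phrases)
--     return category_sentence_phrases
-- ===== SOURCE B (Python) =====
-- import operator
--
-- ENTITY_CATEGORIES = ['PER', 'FAC', 'GPE', 'LOC', 'VEH', 'ORG']
--
--
-- def get_category_sentence_phrases(sentence_labels, categories=None):
--     if categories is None:
--         categories = ENTITY_CATEGORIES
--     category_to_id = {category: i for i, category in enumerate(categories)}
--
--     per_sentence = []
--     for labels in sentence_labels:
--         buckets = [list() for _ in categories]
--         for depth in range(len(labels[0])):
--             column = [token[depth] for token in labels]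
--             for t, lab in enumerate(column):
--                 if lab == 'O' or lab.startswith('I-'):
--                     continue
--                 if not lab.startswith('B-'):
--                     raise ValueError('Unexpected label: {}'.format(lab))
--                 category_id = category_to_id.get(lab[2:])
--                 if category_id is None:
--                     continue
--                 end = t + 1
--                 while end < len(column) and column[end].startswith('I-'):
--                     end += 1
--                 buckets[category_id].append((t, end, depth))
--         for phrases in buckets:
--             phrases.sort(key=operator.itemgetter(0, 1))
--         per_sentence.append(buckets)
--     return [[row[i] for row in per_sentence] for i in range(len(categories))]
-- ===== Notes on version B (the rewrite author's own statement) =====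
-- stated objective: alternative
-- what changed: B replaces A's token-by-token open/close state machine (carrying category_id/t_start through every token and patching in an end-of-sentence close) with a per-depth start-scan that opens a phrase only at a known 'B-<cat>' and finds its end with an inner while over the following 'I-' run, and builds the output sentence-major with a final transpose instead of A's category-major fold with per-sentence appends and a re-sort.
import Mathlib
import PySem

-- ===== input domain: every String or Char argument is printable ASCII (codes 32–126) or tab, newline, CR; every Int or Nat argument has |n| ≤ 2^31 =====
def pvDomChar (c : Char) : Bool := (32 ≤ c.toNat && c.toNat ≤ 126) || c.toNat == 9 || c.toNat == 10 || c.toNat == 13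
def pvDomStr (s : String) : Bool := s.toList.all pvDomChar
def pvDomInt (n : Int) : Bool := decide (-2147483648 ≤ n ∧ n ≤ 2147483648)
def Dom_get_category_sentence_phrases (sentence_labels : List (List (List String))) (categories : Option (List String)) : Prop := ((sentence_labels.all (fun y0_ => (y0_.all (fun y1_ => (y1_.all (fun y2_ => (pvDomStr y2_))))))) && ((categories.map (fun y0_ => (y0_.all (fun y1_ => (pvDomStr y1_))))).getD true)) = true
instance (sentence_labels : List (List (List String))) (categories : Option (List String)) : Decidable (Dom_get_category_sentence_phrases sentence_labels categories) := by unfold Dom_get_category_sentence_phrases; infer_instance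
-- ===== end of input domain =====

-- B re-implements the BIO-to-phrase conversion as a per-depth start-scan (find each 'B-<cat>' start,
-- walk the following 'I-' run to get the end) plus a final transpose, instead of A's token-by-token
-- open/close state machine folded into the output; objective: alternative decomposition, same cost.
-- ENTITY_CATEGORIES (module constant, shared by both Pythons)
def pvEntityCategories : List String := ["PER", "FAC", "GPE", "LOC", "VEH", "ORG"]

-- category_to_id = {category: i for i, category in enumerate(categories)}  (identical in Source A and Source B)
def pvCatToId (categories : List String) : PySem.Dict String Int :=
  (PySem.List.enumerate categories 0).foldl (fun d p => d.insert p.2 p.1) PySem.Dict.empty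

-- lists[i].append(p) for a list of lists and a nonnegative in-range index i (shared)
def pvAppendAt (ls : List (List (Int × Int × Int))) (i : Int) (p : Int × Int × Int) :
    List (List (Int × Int × Int)) :=
  ls.set i.toNat (ls.getD i.toNat [] ++ [p])

-- ===== PORT A =====
-- A's inner token loop at one nest depth: state (category_id, t_start) as Option, phrases appended
-- into the per-category accumulator `acc`; after the loop an open phrase closes at t = len(labels).
-- (On a label that is none of 'O'/'B-'/'I-' Python raises ValueError — outside Pre_; the port skips it.)
def pvColA (cm : PySem.Dict String Int) (depth : Int) (toks : List (List String)) (t : Int)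
    (st : Option (Int × Int)) (acc : List (List (Int × Int × Int))) :
    List (List (Int × Int × Int)) :=
  match toks with
  | [] =>
      match st with
      | some (c, s) => pvAppendAt acc c (s, t, depth)
      | none => acc
  | tok :: rest =>
      let lab := PySem.List.pyGetD tok depth ""
      if lab == "O" || PySem.Str.startswith lab "B-" then
        let acc' := match st with
          | some (c, s) => pvAppendAt acc c (s, t, depth)
          | none => acc
        let st' : Option (Int × Int) :=
          if PySem.Str.startswith lab "B-" then
            match cm.get? (PySem.Str.slice lab (some 2) none) with
            | some c => some (c, t)
            | none => none
          else none
        pvColA cm depth rest (t + 1) st' acc'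
      else
        -- 'I-…': pass  (anything else: ValueError, outside Pre_)
        pvColA cm depth rest (t + 1) st acc

-- one sentence: loop over depths, then sort each category's phrases by (t_start, t_end)
def pvSentA (cm : PySem.Dict String Int) (k : Nat) (labels : List (List String)) :
    List (List (Int × Int × Int)) :=
  let cp := (PySem.List.pyRange 0 ((PySem.List.pyGetD labels 0 []).length : Int) 1).foldl
      (fun acc depth => pvColA cm depth labels 0 none acc) (List.replicate k [])
  cp.map (fun phrases => PySem.List.sorted2 phrases (fun p => p.1) (fun p => p.2.1))

def get_category_sentence_phrases (sentence_labels : List (List (List String)))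
    (categories : Option (List String)) : List (List (List (Int × Int × Int))) :=
  let cats := categories.getD pvEntityCategories
  let cm := pvCatToId cats
  sentence_labels.foldl
    (fun acc labels => List.zipWith (fun cs p => cs ++ [p]) acc (pvSentA cm cats.length labels))
    (List.replicate cats.length [])

-- ===== PORT B =====
-- Source B's  `while end < len(column) and column[end].startswith('I-'): end += 1`
def pvEndWhile : List String → Int → Int
  | [], e => e
  | lab :: rest, e =>
      if PySem.Str.startswith lab "I-" then pvEndWhile rest (e + 1) else e

-- Source B's start-scan over one depth column: a phrase opens exactly at a 'B-<cat>' with known <cat>;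
-- its end is found by the inner while loop. (The ValueError branch is outside Pre_; the port skips.)
def pvScanB (cm : PySem.Dict String Int) (depth : Int) :
    List String → Int → List (List (Int × Int × Int)) → List (List (Int × Int × Int))
  | [], _, buckets => buckets
  | lab :: rest, t, buckets =>
      if lab == "O" || PySem.Str.startswith lab "I-" then
        pvScanB cm depth rest (t + 1) buckets
      else if !(PySem.Str.startswith lab "B-") then
        -- raise ValueError  (outside Pre_)
        pvScanB cm depth rest (t + 1) buckets
      else
        match cm.get? (PySem.Str.slice lab (some 2) none) with
        | none => pvScanB cm depth rest (t + 1) buckets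
        | some c => pvScanB cm depth rest (t + 1)
            (pvAppendAt buckets c (t, pvEndWhile rest (t + 1), depth))

def pvSentB (cm : PySem.Dict String Int) (k : Nat) (labels : List (List String)) :
    List (List (Int × Int × Int)) :=
  let buckets := (PySem.List.pyRange 0 ((PySem.List.pyGetD labels 0 []).length : Int) 1).foldl
      (fun b depth => pvScanB cm depth (labels.map (fun tok => PySem.List.pyGetD tok depth "")) 0 b)
      (List.replicate k [])
  buckets.map (fun phrases => PySem.List.sorted2 phrases (fun p => p.1) (fun p => p.2.1))

def get_category_sentence_phrases_alt (sentence_labels : List (List (List String)))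
    (categories : Option (List String)) : List (List (List (Int × Int × Int))) :=
  let cats := categories.getD pvEntityCategories
  let cm := pvCatToId cats
  let perSentence := sentence_labels.map (fun labels => pvSentB cm cats.length labels)
  (PySem.List.pyRange 0 (cats.length : Int) 1).map
    (fun i => perSentence.map (fun row => PySem.List.pyGetD row i []))

-- ===== PRECONDITION & SPEC =====
-- a label A accepts: exactly 'O' or one starting with 'B-' or 'I-'
def pvLabelOk (s : String) : Bool :=
  s == "O" || PySem.Str.startswith s "B-" || PySem.Str.startswith s "I-"

-- Pre_ = exactly the inputs where Python A returns normally: every sentence is nonempty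
-- (labels[0] would raise IndexError), every token carries at least len(labels[0]) nest labels
-- (label[depth] would raise IndexError), and every label read is 'O'/'B-…'/'I-…' (else ValueError).
def Pre_get_category_sentence_phrases (sentence_labels : List (List (List String)))
    (categories : Option (List String)) : Prop :=
  ∀ labels ∈ sentence_labels, labels ≠ [] ∧
    ∀ tok ∈ labels, (labels.headD []).length ≤ tok.length ∧
      ∀ d < (labels.headD []).length, pvLabelOk (tok.getD d "") = true

instance (sentence_labels : List (List (List String))) (categories : Option (List String)) :
    Decidable (Pre_get_category_sentence_phrases sentence_labels categories) := by
  unfold Pre_get_category_sentence_phrases; infer_instance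

def pvWitness_get_category_sentence_phrases : List (List (List String)) × Option (List String) :=
  ([[["B-PER", "O"], ["I-PER", "B-GPE"], ["O", "I-GPE"]]], none)

def Spec_get_category_sentence_phrases (sentence_labels : List (List (List String))) (categories : Option (List String)) (out : List (List (List (Int × Int × Int)))) : Prop := out = get_category_sentence_phrases_alt sentence_labels categories
instance (sentence_labels : List (List (List String))) (categories : Option (List String)) (out : List (List (List (Int × Int × Int)))) : Decidable (Spec_get_category_sentence_phrases sentence_labels categories out) := by unfold Spec_get_category_sentence_phrases; infer_instance

-- ===== CLAIM (what is proved, stated in full; the proofs are below) =====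
def Claim_equal_get_category_sentence_phrases : Prop := ∀ (sentence_labels : List (List (List String))) (categories : Option (List String)), Dom_get_category_sentence_phrases sentence_labels categories → Pre_get_category_sentence_phrases sentence_labels categories → Spec_get_category_sentence_phrases sentence_labels categories (get_category_sentence_phrases sentence_labels categories)

-- ===== LEMMAS AND PROOFS =====

theorem pv_startswith_B_not_I (lab : String) (h : PySem.Str.startswith lab "B-" = true) :
    PySem.Str.startswith lab "I-" = false := by
  by_contra hI
  rw [Bool.not_eq_false] at hI
  rw [PySem.Str.startswith_eq, PySem.Chars.startswith_iff] at h hI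
  obtain ⟨u, hu⟩ := h
  obtain ⟨v, hv⟩ := hI
  rw [← hu] at hv
  simp at hv

theorem pv_O_not_B : PySem.Str.startswith "O" "B-" = false := by decide
theorem pv_O_not_I : PySem.Str.startswith "O" "I-" = false := by decide

theorem pv_col_eq (cm : PySem.Dict String Int) (depth : Int) (toks : List (List String))
    (t : Int) (st : Option (Int × Int)) (acc : List (List (Int × Int × Int)))
    (hv : ∀ tok ∈ toks, pvLabelOk (PySem.List.pyGetD tok depth "") = true) :
    pvColA cm depth toks t st acc =
      pvScanB cm depth (toks.map (fun tok => PySem.List.pyGetD tok depth "")) t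
        (match st with
         | some (c, s) =>
             pvAppendAt acc c
               (s, pvEndWhile (toks.map (fun tok => PySem.List.pyGetD tok depth "")) t, depth)
         | none => acc) := by
  induction toks generalizing t st acc with
  | nil =>
      cases st with
      | none => rfl
      | some p => cases p with | mk c s => rfl
  | cons tok rest ih =>
      have hvt : pvLabelOk (PySem.List.pyGetD tok depth "") = true :=
        hv tok (List.mem_cons_self)
      have hvr : ∀ x ∈ rest, pvLabelOk (PySem.List.pyGetD x depth "") = true :=
        fun x hx => hv x (List.mem_cons_of_mem _ hx)
      by_cases hO : (PySem.List.pyGetD tok depth "" == "O") = true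
      · have hlab : PySem.List.pyGetD tok depth "" = "O" := by simpa using hO
        simp only [pvColA, pvScanB, pvEndWhile, List.map_cons, hlab, pv_O_not_B, pv_O_not_I,
          BEq.rfl, Bool.true_or, Bool.or_true, if_true, if_false, ite_true, ite_false,
          Bool.false_or, Bool.or_false, reduceIte, Bool.false_eq_true, eq_self_iff_true]
        rw [ih _ none _ hvr]
      · by_cases hB : PySem.Str.startswith (PySem.List.pyGetD tok depth "") "B-" = true
        · have hI := pv_startswith_B_not_I _ hB
          simp only [pvColA, pvScanB, pvEndWhile, List.map_cons, hO, hB, hI,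
            Bool.false_or, Bool.or_false, Bool.true_or, if_true, ite_true, Bool.not_true,
            Bool.false_eq_true, if_false, ite_false, reduceIte, Bool.false_eq_true, eq_self_iff_true]
          cases hg : cm.get? (PySem.Str.slice (PySem.List.pyGetD tok depth "") (some 2) none) with
          | none => rw [ih _ none _ hvr]
          | some c => rw [ih _ (some (c, t)) _ hvr]
        · have hI : PySem.Str.startswith (PySem.List.pyGetD tok depth "") "I-" = true := by
            have h := hvt
            simp only [pvLabelOk, Bool.or_eq_true] at h
            rcases h with (h | h) | h
            · exact absurd h hO
            · exact absurd h hB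
            · exact h
          simp only [pvColA, pvScanB, pvEndWhile, List.map_cons, hO, hB, hI,
            Bool.false_or, Bool.or_true, Bool.true_or, if_true, ite_true, if_false, ite_false, reduceIte, Bool.false_eq_true, eq_self_iff_true]
          rw [ih _ st _ hvr]

theorem pv_appendAt_length (ls : List (List (Int × Int × Int))) (i : Int) (p : Int × Int × Int) :
    (pvAppendAt ls i p).length = ls.length := by
  simp [pvAppendAt]

theorem pv_scanB_length (cm : PySem.Dict String Int) (depth : Int) :
    ∀ (col : List String) (t : Int) (b : List (List (Int × Int × Int))),
      (pvScanB cm depth col t b).length = b.length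
  | [], _, _ => rfl
  | lab :: rest, t, b => by
      simp only [pvScanB]
      split_ifs with h1 h2
      · exact pv_scanB_length cm depth rest _ b
      · exact pv_scanB_length cm depth rest _ b
      · cases hg : cm.get? (PySem.Str.slice lab (some 2) none) with
        | none => exact pv_scanB_length cm depth rest _ b
        | some c =>
            rw [pv_scanB_length cm depth rest _ _, pv_appendAt_length]

theorem pv_foldl_scan_length (cm : PySem.Dict String Int) (labels : List (List String)) :
    ∀ (ds : List Int) (b : List (List (Int × Int × Int))),
      (ds.foldl (fun b depth =>
        pvScanB cm depth (labels.map (fun tok => PySem.List.pyGetD tok depth "")) 0 b) b).length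
        = b.length
  | [], _ => rfl
  | d :: ds, b => by
      simp only [List.foldl_cons]
      rw [pv_foldl_scan_length cm labels ds _, pv_scanB_length]

theorem pv_sentB_length (cm : PySem.Dict String Int) (k : Nat) (labels : List (List String)) :
    (pvSentB cm k labels).length = k := by
  unfold pvSentB
  simp only [List.length_map]
  rw [pv_foldl_scan_length, List.length_replicate]

theorem pv_sent_eq (cm : PySem.Dict String Int) (k : Nat) (labels : List (List String))
    (hpre : ∀ tok ∈ labels, (labels.headD []).length ≤ tok.length ∧
      ∀ d < (labels.headD []).length, pvLabelOk (tok.getD d "") = true) :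
    pvSentA cm k labels = pvSentB cm k labels := by
  unfold pvSentA pvSentB
  rw [PySem.List.foldl_congr_mem (g := fun b depth =>
      pvScanB cm depth (labels.map (fun tok => PySem.List.pyGetD tok depth "")) 0 b)]
  intro acc d hd
  rw [PySem.List.mem_pyRange_one] at hd
  have hcol : ∀ tok ∈ labels, pvLabelOk (PySem.List.pyGetD tok d "") = true := by
    intro tok htok
    have h2 := (hpre tok htok).2
    have hlen := (hpre tok htok).1
    have hhead : PySem.List.pyGetD labels 0 [] = labels.headD [] := by
      rw [PySem.List.pyGetD_zero]
      cases labels <;> rfl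
    have hdn : d.toNat < (labels.headD []).length := by
      rw [hhead] at hd
      omega
    have := h2 d.toNat hdn
    rw [PySem.List.pyGetD_of_nonneg _ _ hd.1]
    exact this
  exact (pv_col_eq cm d labels 0 none acc hcol)


theorem pv_transpose (k : Nat) :
    ∀ (rows : List (List (List (Int × Int × Int)))) (acc : List (List (List (Int × Int × Int)))),
      acc.length = k → (∀ r ∈ rows, r.length = k) →
      rows.foldl (fun a r => List.zipWith (fun cs p => cs ++ [p]) a r) acc
        = (PySem.List.pyRange 0 (k : Int) 1).map
            (fun i => PySem.List.pyGetD acc i [] ++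
              rows.map (fun row => PySem.List.pyGetD row i []))
  | [], acc, hacc, _ => by
      simp only [List.foldl_nil, List.map_nil, List.append_nil]
      subst hacc
      exact (PySem.List.map_pyGetD_pyRange_zero' acc []).symm
  | r :: rest, acc, hacc, hrows => by
      have hr : r.length = k := hrows r List.mem_cons_self
      have hzip : (List.zipWith (fun cs p => cs ++ [p]) acc r).length = k := by
        rw [List.length_zipWith, hacc, hr, Nat.min_self]
      simp only [List.foldl_cons]
      rw [pv_transpose k rest _ hzip (fun x hx => hrows x (List.mem_cons_of_mem _ hx))]
      apply List.map_congr_left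
      intro i hi
      rw [PySem.List.mem_pyRange_one] at hi
      have hik : i.toNat < k := by omega
      rw [PySem.List.pyGetD_eq_getElem _ _ hi.1 (by rw [hzip]; exact_mod_cast hi.2),
        List.getElem_zipWith,
        PySem.List.pyGetD_eq_getElem acc _ hi.1 (by rw [hacc]; exact_mod_cast hi.2),
        List.map_cons,
        PySem.List.pyGetD_eq_getElem r _ hi.1 (by rw [hr]; exact_mod_cast hi.2)]
      simp [List.append_assoc]

theorem pv_main (sentence_labels : List (List (List String))) (categories : Option (List String))
    (hpre : ∀ labels ∈ sentence_labels, labels ≠ [] ∧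
      ∀ tok ∈ labels, (labels.headD []).length ≤ tok.length ∧
        ∀ d < (labels.headD []).length, pvLabelOk (tok.getD d "") = true) :
    get_category_sentence_phrases sentence_labels categories
      = get_category_sentence_phrases_alt sentence_labels categories := by
  unfold get_category_sentence_phrases get_category_sentence_phrases_alt
  generalize categories.getD pvEntityCategories = cats
  rw [PySem.List.foldl_congr_mem _ _
      (fun acc labels => List.zipWith (fun cs p => cs ++ [p]) acc
        (pvSentB (pvCatToId cats) cats.length labels)) _
      (fun acc labels hl => by rw [pv_sent_eq _ _ _ (fun tok htok => (hpre labels hl).2 tok htok)]),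
    ← List.foldl_map,
    pv_transpose cats.length _ _ (List.length_replicate) (by
      intro rr hrr
      obtain ⟨labels, _, rfl⟩ := List.mem_map.mp hrr
      exact pv_sentB_length _ _ _)]
  apply List.map_congr_left
  intro i hi
  rw [PySem.List.mem_pyRange_one] at hi
  rw [PySem.List.pyGetD_eq_getElem _ _ hi.1 (by rw [List.length_replicate]; exact_mod_cast hi.2),
    List.getElem_replicate, List.nil_append]

-- ===== VERDICT (by name: the statement is the Claim_ definition above) =====
theorem get_category_sentence_phrases_spec : Claim_equal_get_category_sentence_phrases := by
  intro sentence_labels categories _ hpre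
  exact pv_main sentence_labels categories hpre
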